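-- pv_equiv track=rewrite | github.com/BDR-Pro/GraphYML | src/utils/index_utils.py | tokenize_text
-- ===== SOURCE A (Python) =====
-- from typing import Any, Dict, List, Tuple, Union, Optional, Set, Hashable
--
-- def tokenize_text(text: str) -> List[str]:
--     """
--     Tokenize text into words.
--
--     Args:
--         text: Text to tokenize
--
--     Returns:
--         List[str]: List of tokens
--     """
--     if not text or not isinstance(text, str):
--         return []
--
--     # Convert to lowercase
--     text = text.lower()
--
--     # Replace punctuation with spaces
--     for char in '.,;:!?()[]{}"\'':
--         text = text.replace(char, ' ')
--
--     # Split on whitespace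
--     tokens = text.split()
--
--     # Remove empty tokens
--     tokens = [token for token in tokens if token]
--
--     return tokens
-- ===== SOURCE B (Python) =====
-- def tokenize_text(text):
--     if not text or not isinstance(text, str):
--         return []
--
--     punct = set('.,;:!?()[]{}"\'')
--     tokens = []
--     buf = []
--     for ch in text.lower():
--         if ch in punct or ch.isspace():
--             if buf:
--                 tokens.append(''.join(buf))
--                 buf = []
--         else:
--             buf.append(ch)
--     if buf:
--         tokens.append(''.join(buf))
--     return tokens
-- ===== Notes on version B (the rewrite author's own statement) =====
-- stated objective: alternative
-- what changed: Replaces A's 14 full-string replace passes plus a split pass by one single pass over the lowered text that maintains a running word buffer and flushes it at every punctuation or whitespace character.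
import Mathlib
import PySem

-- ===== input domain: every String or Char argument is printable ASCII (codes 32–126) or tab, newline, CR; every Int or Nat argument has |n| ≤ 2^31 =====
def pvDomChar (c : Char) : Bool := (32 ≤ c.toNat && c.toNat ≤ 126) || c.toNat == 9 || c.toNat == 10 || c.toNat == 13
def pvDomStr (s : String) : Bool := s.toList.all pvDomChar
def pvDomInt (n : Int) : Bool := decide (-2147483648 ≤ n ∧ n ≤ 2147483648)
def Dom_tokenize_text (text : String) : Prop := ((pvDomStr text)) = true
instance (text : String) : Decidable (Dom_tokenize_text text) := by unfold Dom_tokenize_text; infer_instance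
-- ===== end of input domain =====

-- B replaces A's 14 whole-string punctuation-replace passes + split by one buffered scan (alternative decomposition; return value only).

-- ===== PORT A =====
def tokenize_text (text : String) : List String :=
  -- `not text or not isinstance(text, str)` : the isinstance test is always true here
  if text = "" then []
  else
    -- text = text.lower()
    let t0 := PySem.Str.lower text
    -- for char in '.,;:!?()[]{}"\'': text = text.replace(char, ' ')
    let t1 := (".,;:!?()[]{}\"'".toList).foldl
      (fun s c => PySem.Str.replace s (String.ofList [c]) " ") t0
    -- tokens = text.split()
    let tokens := PySem.Str.split₀ t1
    -- [token for token in tokens if token]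
    tokens.filter (fun token => token ≠ "")

-- ===== PORT B =====
def tokenize_text_alt (text : String) : List String :=
  if text = "" then []
  else
    let punct := ".,;:!?()[]{}\"'".toList
    let r := (PySem.Str.lower text).toList.foldl
      (fun (st : List String × List Char) ch =>
        if punct.contains ch || PySem.Chars.isspace ch then
          if st.2.isEmpty then st else (st.1 ++ [String.ofList st.2], ([] : List Char))
        else (st.1, st.2 ++ [ch]))
      ([], [])
    if r.2.isEmpty then r.1 else r.1 ++ [String.ofList r.2]

-- ===== PRECONDITION & SPEC =====
def Spec_tokenize_text (text : String) (out : List String) : Prop := out = tokenize_text_alt text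
instance (text : String) (out : List String) : Decidable (Spec_tokenize_text text out) := by unfold Spec_tokenize_text; infer_instance

-- ===== CLAIM (what is proved, stated in full; the proofs are below) =====
def Claim_equal_tokenize_text : Prop := ∀ (text : String), Dom_tokenize_text text → Spec_tokenize_text text (tokenize_text text)

-- ===== LEMMAS AND PROOFS =====

-- replacing a single character by a single character is a map
theorem replace_go_single (p q : Char) :
    ∀ (l : List Char) (acc : List Char) (fuel : Nat), l.length ≤ fuel →
      PySem.Chars.replace.go [p] [q] fuel l acc
        = acc.reverse ++ l.map (fun c => if c = p then q else c) := by
  intro l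
  induction l with
  | nil =>
      intro acc fuel _
      cases fuel <;> simp [PySem.Chars.replace.go]
  | cons c t ih =>
      intro acc fuel hf
      cases fuel with
      | zero => simp at hf
      | succ n =>
        by_cases hc : c = p
        · subst hc
          have : [c].isPrefixOf (c :: t) = true := by simp [List.isPrefixOf]
          simp only [PySem.Chars.replace.go, this, if_true, List.length_cons,
            List.length_nil, List.drop_succ_cons, List.drop_zero, List.reverse_cons,
            List.reverse_nil, List.nil_append, List.singleton_append]
          rw [ih (q :: acc) n (by simpa using hf)]
          simp
        · have : [p].isPrefixOf (c :: t) = false := by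
            simp [List.isPrefixOf]; exact fun h => absurd h.symm hc
          simp only [PySem.Chars.replace.go, this, Bool.false_eq_true, if_false]
          rw [ih (c :: acc) n (by simpa using hf)]
          simp [hc]

theorem replace_single (p q : Char) (s : List Char) :
    PySem.Chars.replace s [p] [q] = s.map (fun c => if c = p then q else c) := by
  have h : ([p] : List Char).isEmpty = false := rfl
  simp only [PySem.Chars.replace, h, Bool.false_eq_true, if_false]
  exact replace_go_single p q s [] s.length le_rfl

-- the fold of single-char replacements is one map
theorem foldl_replace_map (ps : List Char) :
    ∀ (s : List Char),
      ps.foldl (fun s c => PySem.Chars.replace s [c] [' ']) s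
        = s.map (fun c => if ps.contains c then ' ' else c) := by
  induction ps with
  | nil => intro s; simp
  | cons p ps ih =>
      intro s
      simp only [List.foldl_cons]
      rw [replace_single, ih, List.map_map]
      apply List.map_congr_left
      intro c _
      by_cases hp : c = p
      · subst hp; by_cases hm : ps.contains c <;> simp [hm]
      · by_cases hm : ps.contains c <;> simp [hp, hm]

-- B's scan at the level of character lists
def pvCharStep (punct : List Char) (st : List (List Char) × List Char) (ch : Char) :
    List (List Char) × List Char :=
  if punct.contains ch || PySem.Chars.isspace ch then
    if st.2.isEmpty then st else (st.1 ++ [st.2], [])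
  else (st.1, st.2 ++ [ch])

def pvFinish (r : List (List Char) × List Char) : List (List Char) :=
  if r.2.isEmpty then r.1 else r.1 ++ [r.2]

-- tokens accumulated so far factor out of the scan
theorem foldl_charStep_factor (punct : List Char) :
    ∀ (l : List Char) (toks : List (List Char)) (b : List Char),
      l.foldl (pvCharStep punct) (toks, b)
        = (toks ++ (l.foldl (pvCharStep punct) ([], b)).1,
           (l.foldl (pvCharStep punct) ([], b)).2) := by
  intro l
  induction l with
  | nil => intro toks b; simp
  | cons c t ih =>
      intro toks b
      simp only [List.foldl_cons, pvCharStep]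
      by_cases hd : (punct.contains c || PySem.Chars.isspace c) = true
      · by_cases hb : b.isEmpty
        · simp only [hd, if_true, hb]
          exact ih toks b
        · have hb' : b.isEmpty = false := by simpa using hb
          simp only [hd, if_true, hb', Bool.false_eq_true, if_false, List.nil_append]
          rw [ih (toks ++ [b]) [], ih [b] []]
          simp
      · have hd' : (punct.contains c || PySem.Chars.isspace c) = false := by simpa using hd
        simp only [hd', Bool.false_eq_true, if_false]
        exact ih toks (b ++ [c])

-- split₀ of the punctuation-to-space image is B's scan
theorem split_go_eq_scan (punct : List Char)
    (g : Char → Char)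
    (hg : ∀ c, PySem.Chars.isspace (g c) = (punct.contains c || PySem.Chars.isspace c))
    (hid : ∀ c, (punct.contains c || PySem.Chars.isspace c) = false → g c = c) :
    ∀ (l : List Char) (buf : List Char) (acc : List (List Char)),
      PySem.Chars.split₀.go (l.map g) buf acc
        = acc.reverse ++ pvFinish (l.foldl (pvCharStep punct) ([], buf.reverse)) := by
  intro l
  induction l with
  | nil =>
      intro buf acc
      by_cases hb : buf.isEmpty
      · have : buf = [] := by simpa [List.isEmpty_iff] using hb
        subst this
        simp [PySem.Chars.split₀.go, pvFinish]
      · simp [PySem.Chars.split₀.go, hb, pvFinish, List.isEmpty_iff,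
          (by simpa [List.isEmpty_iff] using hb : buf ≠ [])]
  | cons c t ih =>
      intro buf acc
      by_cases hd : (punct.contains c || PySem.Chars.isspace c) = true
      · have hs : PySem.Chars.isspace (g c) = true := by rw [hg]; exact hd
        by_cases hb : buf.isEmpty
        · have hb' : buf = [] := by simpa [List.isEmpty_iff] using hb
          subst hb'
          simp only [List.map_cons, PySem.Chars.split₀.go, hs, if_true,
            List.isEmpty_nil]
          rw [ih [] acc]
          simp only [List.foldl_cons, pvCharStep, hd, if_true, List.isEmpty_nil,
            List.reverse_nil]
        · have hb' : buf.isEmpty = false := by simpa using hb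
          have hbne : buf.reverse.isEmpty = false := by
            simp only [List.isEmpty_eq_false_iff, ne_eq, List.reverse_eq_nil_iff]
            simpa [List.isEmpty_iff] using hb
          simp only [List.map_cons, PySem.Chars.split₀.go, hs, if_true, hb',
            Bool.false_eq_true, if_false]
          rw [ih [] (buf.reverse :: acc)]
          simp only [List.foldl_cons, pvCharStep, hd, if_true, hbne,
            Bool.false_eq_true, if_false, List.nil_append, List.reverse_nil]
          rw [foldl_charStep_factor punct t [buf.reverse] []]
          simp only [pvFinish, List.reverse_cons]
          by_cases h2 : (t.foldl (pvCharStep punct) ([], [])).2.isEmpty <;> simp [h2]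
      · have hd' : (punct.contains c || PySem.Chars.isspace c) = false := by
          simpa using hd
        have hgc : g c = c := hid c hd'
        have hs : PySem.Chars.isspace c = false := (Bool.or_eq_false_iff.mp hd').2
        simp only [List.map_cons, PySem.Chars.split₀.go, hgc, hs, Bool.false_eq_true,
          if_false]
        rw [ih (c :: buf) acc]
        simp only [List.foldl_cons, pvCharStep, hd', Bool.false_eq_true, if_false,
          List.reverse_cons]

-- every token the scan emits is nonempty
theorem scan_tokens_ne_nil (punct : List Char) :
    ∀ (l : List Char) (toks : List (List Char)) (b : List Char),
      (∀ t ∈ toks, t ≠ []) →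
      ∀ t ∈ pvFinish (l.foldl (pvCharStep punct) (toks, b)), t ≠ [] := by
  intro l
  induction l with
  | nil =>
      intro toks b htoks t ht
      simp only [List.foldl_nil, pvFinish] at ht
      by_cases hb : b.isEmpty
      · simp [hb] at ht; exact htoks t ht
      · simp [hb] at ht
        rcases ht with ht | ht
        · exact htoks t ht
        · subst ht; simpa [List.isEmpty_iff] using hb
  | cons c l ih =>
      intro toks b htoks t ht
      simp only [List.foldl_cons, pvCharStep] at ht
      by_cases hd : (punct.contains c || PySem.Chars.isspace c) = true
      · by_cases hb : b.isEmpty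
        · simp only [hd, if_true, hb, if_true] at ht
          exact ih toks b htoks t ht
        · simp only [hd, if_true, hb, if_false] at ht
          refine ih (toks ++ [b]) [] ?_ t ht
          intro u hu
          rcases List.mem_append.mp hu with hu | hu
          · exact htoks u hu
          · simp at hu; subst hu; simpa [List.isEmpty_iff] using hb
      · simp only [hd, if_false] at ht
        exact ih toks (b ++ [c]) htoks t ht

-- B's string-level scan is the char-level scan with String.ofList applied to the tokens
theorem foldl_step_eq_charStep (punct : List Char) :
    ∀ (l : List Char) (toks : List (List Char)) (b : List Char),
      l.foldl
        (fun (st : List String × List Char) ch =>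
          if punct.contains ch || PySem.Chars.isspace ch then
            if st.2.isEmpty then st else (st.1 ++ [String.ofList st.2], ([] : List Char))
          else (st.1, st.2 ++ [ch]))
        (toks.map String.ofList, b)
        = ((l.foldl (pvCharStep punct) (toks, b)).1.map String.ofList,
           (l.foldl (pvCharStep punct) (toks, b)).2) := by
  intro l
  induction l with
  | nil => intro toks b; simp
  | cons c t ih =>
      intro toks b
      simp only [List.foldl_cons, pvCharStep]
      by_cases hd : (punct.contains c || PySem.Chars.isspace c) = true
      · by_cases hb : b.isEmpty
        · simp only [hd, if_true, hb]
          exact ih toks b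
        · have hb' : b.isEmpty = false := by simpa using hb
          have hmk : (toks.map String.ofList) ++ [String.ofList b] = (toks ++ [b]).map String.ofList := by
            simp
          simp only [hd, if_true, hb', Bool.false_eq_true, if_false, hmk]
          exact ih (toks ++ [b]) []
      · have hd' : (punct.contains c || PySem.Chars.isspace c) = false := by simpa using hd
        simp only [hd', Bool.false_eq_true, if_false]
        exact ih toks (b ++ [c])

-- ===== VERDICT (by name: the statement is the Claim_ definition above) =====
theorem tokenize_text_spec : Claim_equal_tokenize_text := by
  intro text _
  unfold Spec_tokenize_text tokenize_text tokenize_text_alt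
  by_cases h0 : text = ""
  · simp [h0]
  · simp only [h0, if_false]
    set punct : List Char := ".,;:!?()[]{}\"'".toList with hpunct
    set L : List Char := (PySem.Str.lower text).toList with hL
    set g : Char → Char := fun c => if punct.contains c then ' ' else c with hgdef
    -- the replace fold, at the char-list level, is one map by g
    have hrep : ((punct.foldl (fun s c => PySem.Str.replace s (String.ofList [c]) " ")
        (PySem.Str.lower text))).toList = L.map g := by
      have : ∀ (ps : List Char) (s : String),
          (ps.foldl (fun s c => PySem.Str.replace s (String.ofList [c]) " ") s).toList
            = ps.foldl (fun l c => PySem.Chars.replace l [c] [' ']) s.toList := by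
        intro ps
        induction ps with
        | nil => intro s; rfl
        | cons p ps ih =>
            intro s
            simp only [List.foldl_cons]
            have h : (PySem.Str.replace s (String.ofList [p]) " ").toList
                = PySem.Chars.replace s.toList [p] [' '] := by simp
            rw [ih, h]
      rw [this, foldl_replace_map]
    -- properties of g
    have hg : ∀ c, PySem.Chars.isspace (g c) = (punct.contains c || PySem.Chars.isspace c) := by
      intro c
      by_cases hc : punct.contains c = true
      · have : g c = ' ' := by rw [hgdef]; simp only [hc, if_true]
        rw [this, hc]
        simp [PySem.Chars.isspace]
      · simp only [Bool.not_eq_true] at hc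
        have : g c = c := by rw [hgdef]; simp only [hc, Bool.false_eq_true, if_false]
        rw [this, hc]; simp
    have hid : ∀ c, (punct.contains c || PySem.Chars.isspace c) = false → g c = c := by
      intro c hc
      rcases Bool.or_eq_false_iff.mp hc with ⟨h1, _⟩
      rw [hgdef]; simp only [h1, Bool.false_eq_true, if_false]
    -- A's result via split₀
    have hsplit : PySem.Chars.split₀ (L.map g)
        = pvFinish (L.foldl (pvCharStep punct) ([], [])) := by
      have := split_go_eq_scan punct g hg hid L [] []
      simpa [PySem.Chars.split₀] using this
    -- Str.split₀ as a map of String.ofList over the char-level split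
    have hstr : PySem.Str.split₀
        (punct.foldl (fun s c => PySem.Str.replace s (String.ofList [c]) " ") (PySem.Str.lower text))
        = (pvFinish (L.foldl (pvCharStep punct) ([], []))).map String.ofList := by
      simp only [PySem.Str.split₀]
      rw [hrep, hsplit]
    rw [hstr]
    -- the filter is the identity: every emitted token is nonempty
    have hne : ∀ t ∈ pvFinish (L.foldl (pvCharStep punct) ([], [])), t ≠ [] :=
      scan_tokens_ne_nil punct L [] [] (by simp)
    have hfil : ((pvFinish (L.foldl (pvCharStep punct) ([], []))).map String.ofList).filter
        (fun token => token ≠ "") = (pvFinish (L.foldl (pvCharStep punct) ([], []))).map String.ofList := by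
      rw [List.filter_eq_self]
      intro t ht
      rcases List.mem_map.mp ht with ⟨l, hl, rfl⟩
      have := hne l hl
      simpa [String.ext_iff] using this
    rw [hfil]
    -- B's side
    have hB := foldl_step_eq_charStep punct L [] []
    simp only [List.map_nil] at hB
    rw [hB]
    set r := L.foldl (pvCharStep punct) ([], []) with hr
    by_cases h2 : r.2.isEmpty
    · simp [pvFinish, h2]
    · simp [pvFinish, h2]
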